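-- pv_equiv track=rewrite | github.com/ALiljekvist/AoC2015 | day17/main.py | count_x_containers
-- ===== SOURCE A (Python) =====
-- AMOUNT = 150
--
-- def count_x_containers(containers, chosen, x):
--     if len(chosen) == x:
--         if sum(chosen) != AMOUNT:
--             return 0
--         return 1
--     tot = 0
--     for i, val in enumerate(containers):
--         chosen.append(val)
--         part = count_x_containers(containers[i+1:], chosen, x)
--         chosen.pop()
--         tot += part
--     return tot
-- ===== SOURCE B (Python) =====
-- AMOUNT = 150
--
-- def count_x_containers(containers, chosen, x):
--     # DP over (count chosen, partial sum): ways[(j, s)] = number of ways to pick j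
--     # containers from those processed so far with sum s; answer is ways[(k, target)].
--     k = x - len(chosen)
--     if k < 0:
--         return 0
--     target = AMOUNT - sum(chosen)
--     ways = {(0, 0): 1}
--     for v in containers:
--         nxt = dict(ways)
--         for (j, s), c in ways.items():
--             if j < k:
--                 key = (j + 1, s + v)
--                 nxt[key] = nxt.get(key, 0) + c
--         ways = nxt
--     return ways.get((k, target), 0)
-- ===== Notes on version B (the rewrite author's own statement) =====
-- stated objective: faster
-- what changed: A enumerates every size-x combination by recursive branching over suffixes; B makes one left-to-right pass maintaining a dict from (count chosen, partial sum) to number of ways, merging combinations that agree on count and sum, and reads off the (k, 150-sum(chosen)) entry.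
import Mathlib
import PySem

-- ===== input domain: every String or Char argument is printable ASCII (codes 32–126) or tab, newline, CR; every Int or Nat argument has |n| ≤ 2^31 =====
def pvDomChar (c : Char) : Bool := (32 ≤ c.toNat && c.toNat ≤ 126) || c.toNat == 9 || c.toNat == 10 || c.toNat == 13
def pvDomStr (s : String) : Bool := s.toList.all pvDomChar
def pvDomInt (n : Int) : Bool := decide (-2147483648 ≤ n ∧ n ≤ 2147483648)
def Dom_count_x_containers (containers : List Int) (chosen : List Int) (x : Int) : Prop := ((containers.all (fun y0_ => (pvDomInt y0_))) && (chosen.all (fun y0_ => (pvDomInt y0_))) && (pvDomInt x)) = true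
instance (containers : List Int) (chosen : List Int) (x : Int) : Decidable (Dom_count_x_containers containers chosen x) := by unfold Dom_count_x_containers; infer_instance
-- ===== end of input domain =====

-- B replaces A's recursive enumeration of all size-x combinations by one left-to-right pass
-- over the containers maintaining a dict from (count chosen, partial sum) to number of ways.
-- A appends to and pops from `chosen` but restores it before returning; the equivalence
-- proved here is about the return value.

-- ===== PORT A =====
def count_x_containers (containers : List Int) (chosen : List Int) (x : Int) : Int :=
  if (chosen.length : Int) = x then
    if chosen.sum ≠ 150 then 0 else 1
  else
    ((PySem.List.enumerate containers).attach.map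
      (fun p => count_x_containers (PySem.List.slice containers (some (p.1.1 + 1)) none)
        (chosen ++ [p.1.2]) x)).foldl (· + ·) 0
termination_by containers.length
decreasing_by
  have h1 : p.1.1 ∈ (PySem.List.enumerate containers).map (·.1) := List.mem_map_of_mem p.2
  rw [PySem.List.map_fst_enumerate] at h1
  have h2 := (PySem.List.mem_pyRange_one).mp h1
  rw [PySem.List.slice_from (a := p.1.1 + 1) (xs := containers) (by omega)]
  simp only [List.length_drop]
  omega

-- ===== PORT B =====
-- one DP update step: fold the current dict's items, adding each (j, s) ↦ c with j < k
-- into the (j + 1, s + v) entry (Source B's inner `for (j, s), c in ways.items()` loop)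
def pvStep (k : Int) (v : Int) (ways : PySem.Dict (Int × Int) Int) : PySem.Dict (Int × Int) Int :=
  ways.items.foldl (fun nxt p =>
    if p.1.1 < k then
      nxt.insert (p.1.1 + 1, p.1.2 + v) (nxt.getD (p.1.1 + 1, p.1.2 + v) 0 + p.2)
    else nxt) ways

def count_x_containers_alt (containers : List Int) (chosen : List Int) (x : Int) : Int :=
  let k : Int := x - chosen.length
  if k < 0 then 0
  else
    let target : Int := 150 - chosen.sum
    let ways := containers.foldl (fun ways v => pvStep k v ways)
      (PySem.Dict.insert PySem.Dict.empty ((0 : Int), (0 : Int)) (1 : Int))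
    ways.getD (k, target) 0

-- ===== PRECONDITION & SPEC =====
def Spec_count_x_containers (containers : List Int) (chosen : List Int) (x : Int) (out : Int) : Prop := out = count_x_containers_alt containers chosen x
instance (containers : List Int) (chosen : List Int) (x : Int) (out : Int) : Decidable (Spec_count_x_containers containers chosen x out) := by unfold Spec_count_x_containers; infer_instance

-- ===== CLAIM (what is proved, stated in full; the proofs are below) =====
def Claim_equal_count_x_containers : Prop := ∀ (containers : List Int) (chosen : List Int) (x : Int), Dom_count_x_containers containers chosen x → Spec_count_x_containers containers chosen x (count_x_containers containers chosen x)

-- ===== LEMMAS AND PROOFS =====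

-- pvN cs j t = number of j-element combinations of cs with sum t (0 for j < 0)
def pvN : List Int → Int → Int → Int
  | [], j, t => if j = 0 ∧ t = 0 then 1 else 0
  | v :: cs, j, t => if j ≤ 0 then (if j = 0 ∧ t = 0 then 1 else 0) else pvN cs j t + pvN cs (j - 1) (t - v)

theorem pvN_nonpos (cs : List Int) (j t : Int) (h : j ≤ 0) :
    pvN cs j t = if j = 0 ∧ t = 0 then 1 else 0 := by
  cases cs <;> simp [pvN, h]

theorem pvN_append (P : List Int) (v : Int) (j t : Int) :
    pvN (P ++ [v]) j t = pvN P j t + pvN P (j - 1) (t - v) := by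
  induction P generalizing j t with
  | nil =>
    by_cases h : j ≤ 0
    · rw [pvN_nonpos _ _ _ h, pvN_nonpos _ _ _ h, pvN_nonpos _ _ _ (by omega)]
      split_ifs <;> first | ring1 | omega
    · simp only [List.nil_append, pvN, if_neg h]
  | cons w P ih =>
    by_cases h : j ≤ 0
    · rw [pvN_nonpos _ _ _ h, pvN_nonpos _ _ _ h, pvN_nonpos _ _ _ (by omega)]
      split_ifs <;> first | ring1 | omega
    · simp only [List.cons_append, pvN, if_neg h, ih]
      by_cases h1 : j - 1 ≤ 0
      · rw [pvN_nonpos P (j-1) (t-v) h1, pvN_nonpos P (j-1) (t-w) h1,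
            pvN_nonpos P (j-1-1) (t-w-v) (by omega), if_pos h1]
        split_ifs <;> first | ring1 | omega
      · rw [if_neg h1]
        ring_nf

-- ===== A side =====
theorem pvEnum_shift {α β : Type} (cs : List α) (F : Int × α → β) (s : Int) :
    (PySem.List.enumerate cs (s + 1)).map F
      = (PySem.List.enumerate cs s).map (fun p => F (p.1 + 1, p.2)) := by
  induction cs generalizing s with
  | nil => simp [PySem.List.enumerate_nil]
  | cons v cs ih => simp [PySem.List.enumerate_cons, ih]

theorem pvMem_enum {α : Type} {cs : List α} {p : Int × α} (h : p ∈ PySem.List.enumerate cs 0) :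
    0 ≤ p.1 ∧ p.1 < cs.length := by
  have h1 : p.1 ∈ (PySem.List.enumerate cs 0).map (·.1) := List.mem_map_of_mem h
  rw [PySem.List.map_fst_enumerate] at h1
  have h2 := (PySem.List.mem_pyRange_one).mp h1
  omega

-- the combinatorial identity behind A's loop over `enumerate(containers)`
theorem pvN_branch (k : Int) (hk : k ≠ 0) :
    ∀ (cs : List Int) (t : Int),
      pvN cs k t = ((PySem.List.enumerate cs 0).map
        (fun p => pvN (cs.drop (p.1 + 1).toNat) (k - 1) (t - p.2))).sum := by
  intro cs
  induction cs with
  | nil => intro t; simp [PySem.List.enumerate_nil, pvN, hk]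
  | cons v cs ih =>
    intro t
    rw [PySem.List.enumerate_cons, List.map_cons, List.sum_cons]
    have hshift : (PySem.List.enumerate cs (0 + 1)).map
        (fun p => pvN ((v :: cs).drop (p.1 + 1).toNat) (k - 1) (t - p.2))
        = (PySem.List.enumerate cs 0).map
          (fun p => pvN ((v :: cs).drop ((p.1 + 1) + 1).toNat) (k - 1) (t - p.2)) := by
      rw [pvEnum_shift]
    have htail : (PySem.List.enumerate cs 0).map
        (fun p => pvN ((v :: cs).drop ((p.1 + 1) + 1).toNat) (k - 1) (t - p.2))
        = (PySem.List.enumerate cs 0).map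
          (fun p => pvN (cs.drop (p.1 + 1).toNat) (k - 1) (t - p.2)) := by
      apply List.map_congr_left
      intro p hp
      have hm := pvMem_enum hp
      have : ((p.1 + 1) + 1).toNat = (p.1 + 1).toNat + 1 := by omega
      rw [this, List.drop_succ_cons]
    rw [hshift, htail]
    by_cases hneg : k ≤ 0
    · rw [pvN_nonpos _ _ _ hneg, if_neg (by omega)]
      have hz : ∀ y ∈ (PySem.List.enumerate cs 0).map
          (fun p => pvN (cs.drop (p.1 + 1).toNat) (k - 1) (t - p.2)), y = 0 := by
        intro y hy
        obtain ⟨p, _, hpy⟩ := List.mem_map.mp hy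
        rw [← hpy, pvN_nonpos _ _ _ (by omega), if_neg (by omega)]
      rw [List.sum_eq_zero hz, pvN_nonpos _ _ _ (by omega), if_neg (by omega)]
      simp
    · rw [show pvN (v :: cs) k t = pvN cs k t + pvN cs (k - 1) (t - v) from by
        simp [pvN, hneg], ih t]
      have : ((0 : Int) + 1).toNat = 1 := by omega
      rw [this, List.drop_succ_cons, List.drop_zero]
      ring

-- characterisation of A's result
theorem pvA_char : ∀ (n : Nat) (cs : List Int), cs.length = n → ∀ (ch : List Int) (x : Int),
    count_x_containers cs ch x = pvN cs (x - ch.length) (150 - ch.sum) := by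
  intro n
  induction n using Nat.strong_induction_on with
  | _ n ih =>
    intro cs hn ch x
    rw [count_x_containers]
    by_cases hx : (ch.length : Int) = x
    · rw [if_pos hx, show x - (ch.length : Int) = 0 by omega, pvN_nonpos _ _ _ le_rfl]
      split_ifs <;> omega
    · rw [if_neg hx]
      have h1 : ∀ q ∈ (PySem.List.enumerate cs 0).attach,
          count_x_containers (PySem.List.slice cs (some (q.1.1 + 1)) none) (ch ++ [q.1.2]) x
          = pvN (cs.drop (q.1.1 + 1).toNat) ((x - ch.length) - 1) ((150 - ch.sum) - q.1.2) := by
        intro q _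
        have hm := pvMem_enum q.2
        rw [PySem.List.slice_from (a := q.1.1 + 1) (xs := cs) (by omega)]
        rw [ih (cs.drop (q.1.1 + 1).toNat).length
          (by simp only [List.length_drop]; omega) _ rfl (ch ++ [q.1.2]) x]
        congr 1
        · simp only [List.length_append, List.length_cons, List.length_nil]
          push_cast
          ring
        · simp only [List.sum_append, List.sum_cons, List.sum_nil]
          ring
      rw [List.map_congr_left h1,
        List.attach_map_val (l := PySem.List.enumerate cs 0)
          (f := fun p => pvN (cs.drop (p.1 + 1).toNat) ((x - ch.length) - 1) ((150 - ch.sum) - p.2))]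
      rw [← List.sum_eq_foldl, ← pvN_branch (x - ch.length) (by omega) cs (150 - ch.sum)]

-- ===== B side =====
theorem pvFilter_sum (key : Int × Int) :
    ∀ (its : List ((Int × Int) × Int)), (its.map (·.1)).Nodup →
      ((its.filter (fun p => p.1 == key)).map (·.2)).sum = (PySem.Dict.mk its).getD key 0 := by
  intro its
  induction its with
  | nil => intro _; simp [PySem.Dict.getD_eq_get?_getD, PySem.Dict.get?]
  | cons p rest ih =>
    intro hnd
    simp only [List.map_cons, List.nodup_cons] at hnd
    rw [PySem.Dict.getD_eq_get?_getD, PySem.Dict.get?_mk_cons]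
    by_cases hp : p.1 = key
    · simp only [List.filter_cons, hp, beq_self_eq_true, if_pos]
      simp only [List.map_cons, List.sum_cons]
      have hz : ((rest.filter (fun q => q.1 == key)).map (·.2)).sum = 0 := by
        have : rest.filter (fun q => q.1 == key) = [] := by
          rw [List.filter_eq_nil_iff]
          intro q hq
          simp only [beq_iff_eq]
          intro hqk
          exact hnd.1 (hp ▸ hqk ▸ List.mem_map_of_mem hq)
        simp [this]
      simp [hz]
    · have : (p.1 == key) = false := by simp [hp]
      simp only [List.filter_cons, this, if_neg Bool.false_ne_true]
      rw [ih hnd.2, PySem.Dict.getD_eq_get?_getD]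

-- effect of Source B's inner items-loop on an arbitrary entry
theorem pvStep_getD (k v : Int) :
    ∀ (l : List ((Int × Int) × Int)) (d : PySem.Dict (Int × Int) Int) (q : Int × Int),
      (l.foldl (fun nxt p =>
        if p.1.1 < k then
          nxt.insert (p.1.1 + 1, p.1.2 + v) (nxt.getD (p.1.1 + 1, p.1.2 + v) 0 + p.2)
        else nxt) d).getD q 0
      = d.getD q 0 + (if q.1 - 1 < k then
          ((l.filter (fun p => p.1 == ((q.1 - 1, q.2 - v) : Int × Int))).map (·.2)).sum else 0) := by
  intro l
  induction l with
  | nil => intro d q; simp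
  | cons p rest ih =>
    intro d q
    simp only [List.foldl_cons]
    rw [ih]
    by_cases hk : p.1.1 < k
    · rw [if_pos hk, PySem.Dict.getD_insert]
      by_cases hq : q = (p.1.1 + 1, p.1.2 + v)
      · subst hq
        have e1 : (p.1.1 + 1 - 1 : Int) = p.1.1 := by ring
        have e2 : (p.1.2 + v - v : Int) = p.1.2 := by ring
        simp only [e1, e2, if_pos hk, List.filter_cons]
        simp only [Prod.mk.eta, beq_self_eq_true, if_pos, List.map_cons, List.sum_cons]
        ring
      · have hpq : (p.1 == ((q.1 - 1, q.2 - v) : Int × Int)) = false := by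
          simp only [beq_eq_false_iff_ne, ne_eq]
          intro hc
          apply hq
          have h1 := congrArg Prod.fst hc
          have h2 := congrArg Prod.snd hc
          simp only at h1 h2
          have : q = (q.1, q.2) := rfl
          rw [this, h1, h2]
          simp only [Prod.mk.injEq]
          constructor <;> ring
        rw [if_neg hq, List.filter_cons]
        simp [hpq]
    · rw [if_neg hk]
      by_cases hq1 : q.1 - 1 < k
      · have hpq : (p.1 == ((q.1 - 1, q.2 - v) : Int × Int)) = false := by
          simp only [beq_eq_false_iff_ne, ne_eq]
          intro hc
          apply hk
          have h1 := congrArg Prod.fst hc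
          simp only at h1
          omega
        rw [List.filter_cons]
        simp [hpq]
      · rw [if_neg hq1, if_neg hq1]

theorem pvNodup_fold (k v : Int) :
    ∀ (l : List ((Int × Int) × Int)) (d : PySem.Dict (Int × Int) Int), d.keys.Nodup →
      (l.foldl (fun nxt p =>
        if p.1.1 < k then
          nxt.insert (p.1.1 + 1, p.1.2 + v) (nxt.getD (p.1.1 + 1, p.1.2 + v) 0 + p.2)
        else nxt) d).keys.Nodup := by
  intro l
  induction l with
  | nil => intro d h; simpa using h
  | cons p rest ih =>
    intro d h
    simp only [List.foldl_cons]
    by_cases hk : p.1.1 < k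
    · rw [if_pos hk]
      exact ih _ (PySem.Dict.nodup_keys_insert _ _ _ h)
    · rw [if_neg hk]
      exact ih _ h

-- loop invariant: after processing prefix P, the dict entry (j, s) holds pvN P j s for 0 ≤ j ≤ k
def pvInv (k : Int) (d : PySem.Dict (Int × Int) Int) (P : List Int) : Prop :=
  d.keys.Nodup ∧ ∀ j s : Int, d.getD (j, s) 0 = if 0 ≤ j ∧ j ≤ k then pvN P j s else 0

theorem pvInv_step (k v : Int) (d : PySem.Dict (Int × Int) Int) (P : List Int)
    (h : pvInv k d P) : pvInv k (pvStep k v d) (P ++ [v]) := by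
  obtain ⟨hnd, hval⟩ := h
  constructor
  · exact pvNodup_fold k v d.items d hnd
  · intro j s
    rw [pvStep, pvStep_getD, pvFilter_sum _ _ hnd]
    have hmk : (PySem.Dict.mk d.items) = d := rfl
    rw [hmk, hval, hval, pvN_append]
    simp only
    by_cases hC : 0 ≤ j ∧ j ≤ k
    · rw [if_pos hC, if_pos hC, if_pos (show j - 1 < k by omega)]
      by_cases hj1 : 0 ≤ j - 1
      · rw [if_pos (show 0 ≤ j - 1 ∧ j - 1 ≤ k by omega)]
      · rw [if_neg (show ¬(0 ≤ j - 1 ∧ j - 1 ≤ k) by omega),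
            pvN_nonpos P (j - 1) (s - v) (by omega),
            if_neg (show ¬(j - 1 = 0 ∧ s - v = 0) by omega)]
    · rw [if_neg hC, if_neg hC]
      by_cases hC2 : j - 1 < k
      · rw [if_pos hC2, if_neg (show ¬(0 ≤ j - 1 ∧ j - 1 ≤ k) by omega)]
        ring
      · rw [if_neg hC2]
        ring

theorem pvInv_foldl (k : Int) :
    ∀ (cs : List Int) (d : PySem.Dict (Int × Int) Int) (P : List Int), pvInv k d P →
      pvInv k (cs.foldl (fun w v => pvStep k v w) d) (P ++ cs) := by
  intro cs
  induction cs with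
  | nil => intro d P h; simpa using h
  | cons v cs ih =>
    intro d P h
    have := ih (pvStep k v d) (P ++ [v]) (pvInv_step k v d P h)
    simpa using this

theorem pvInv_init (k : Int) (hk : 0 ≤ k) :
    pvInv k (PySem.Dict.insert PySem.Dict.empty ((0 : Int), (0 : Int)) (1 : Int)) [] := by
  constructor
  · exact PySem.Dict.nodup_keys_insert _ _ _ PySem.Dict.nodup_keys_empty
  · intro j s
    rw [PySem.Dict.getD_insert]
    by_cases hq : ((j, s) : Int × Int) = (0, 0)
    · have h1 : j = 0 := (Prod.mk.injEq .. ▸ hq : _ ∧ _).1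
      have h2 : s = 0 := (Prod.mk.injEq .. ▸ hq : _ ∧ _).2
      subst h1; subst h2
      rw [if_pos rfl, if_pos ⟨le_rfl, hk⟩, pvN_nonpos _ _ _ le_rfl, if_pos ⟨rfl, rfl⟩]
    · rw [if_neg hq, PySem.Dict.getD_empty]
      have hne : ¬(j = 0 ∧ s = 0) := by
        intro ⟨h1, h2⟩; exact hq (by rw [h1, h2])
      by_cases hr : 0 ≤ j ∧ j ≤ k
      · rw [if_pos hr]
        simp [pvN, hne]
      · rw [if_neg hr]

-- characterisation of B's result
theorem pvB_char (cs : List Int) (ch : List Int) (x : Int) :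
    count_x_containers_alt cs ch x = pvN cs (x - ch.length) (150 - ch.sum) := by
  rw [count_x_containers_alt]
  simp only
  by_cases hk : x - (ch.length : Int) < 0
  · rw [if_pos hk, pvN_nonpos _ _ _ (by omega), if_neg (by omega)]
  · rw [if_neg hk]
    have hinv := pvInv_foldl (x - ch.length) cs
      (PySem.Dict.insert PySem.Dict.empty ((0 : Int), (0 : Int)) (1 : Int)) []
      (pvInv_init _ (by omega))
    simp only [List.nil_append] at hinv
    rw [hinv.2, if_pos ⟨by omega, le_rfl⟩]

-- ===== VERDICT (by name: the statement is the Claim_ definition above) =====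
theorem count_x_containers_spec : Claim_equal_count_x_containers := by
  intro containers chosen x _
  unfold Spec_count_x_containers
  rw [pvA_char containers.length containers rfl, pvB_char]
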